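-- pv_equiv track=rewrite | github.com/guiltykeyboard/MSP-Resources | tools/lint_scripts.py | extract_bash_synopsis
-- ===== SOURCE A (Python) =====
-- def extract_bash_synopsis(text: str) -> str:
--     lines = text.splitlines()
--     i = 0
--     if lines and lines[0].startswith("#!"):
--         i = 1
--     for ln in lines[i:]:
--         s = ln.strip()
--         if s.startswith("#"):
--             s = s.lstrip("#").strip()
--             if s:
--                 return s
--         elif s:
--             break
--     return ""
-- ===== SOURCE B (Python) =====
-- def extract_bash_synopsis(text: str) -> str:
--     lines = text.splitlines()
--     body = lines[1:] if lines and lines[0].startswith("#!") else lines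
--     # pass 1: find the end of the comment/blank header prefix
--     n = 0
--     while n < len(body) and (not body[n].strip() or body[n].strip().startswith("#")):
--         n += 1
--     # pass 2: first non-empty synopsis among the header lines
--     return next((s for s in (ln.strip().lstrip("#").strip() for ln in body[:n]) if s), "")
-- ===== Notes on version B (the rewrite author's own statement) =====
-- stated objective: alternative
-- what changed: A's single fused scan-with-break is split into two passes: a boundary pass computing the length of the blank/comment header prefix, then a search pass returning the first non-empty extracted comment among those header lines.
import Mathlib
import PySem

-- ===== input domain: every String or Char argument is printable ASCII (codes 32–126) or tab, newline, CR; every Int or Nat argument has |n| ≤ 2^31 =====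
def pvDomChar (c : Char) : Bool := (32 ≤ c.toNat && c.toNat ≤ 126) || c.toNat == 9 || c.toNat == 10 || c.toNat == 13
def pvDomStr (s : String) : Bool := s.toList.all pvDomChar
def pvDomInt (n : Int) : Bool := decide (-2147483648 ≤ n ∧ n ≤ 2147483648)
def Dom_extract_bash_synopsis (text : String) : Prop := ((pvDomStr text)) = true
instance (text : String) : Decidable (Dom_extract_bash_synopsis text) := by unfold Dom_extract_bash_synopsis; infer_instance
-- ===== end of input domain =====

-- B replaces A's single fused scan-with-break by two passes (find the header-prefix boundary, then search it); same cost, alternative decomposition.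

-- ===== PORT A =====
-- s.lstrip("#") on a list of code points: drop leading '#' characters (exact for a one-character strip set)
def pvLstripHash (s : String) : String :=
  String.mk (s.toList.dropWhile (· == '#'))

-- the for-loop of A: returns the synopsis, "" on break or exhaustion
def pvA_loop : List String → String
  | [] => ""
  | ln :: rest =>
    let s := PySem.Str.strip ln
    if PySem.Str.startswith s "#" then
      let s2 := PySem.Str.strip (pvLstripHash s)
      if s2 ≠ "" then s2 else pvA_loop rest
    else if s ≠ "" then ""   -- break, then return ""
    else pvA_loop rest

def extract_bash_synopsis (text : String) : String :=
  let lines := PySem.Str.splitlines text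
  let i : Nat :=
    match lines with
    | [] => 0
    | l0 :: _ => if PySem.Str.startswith l0 "#!" then 1 else 0
  pvA_loop (lines.drop i)

-- ===== PORT B =====
-- pass-1 predicate: blank line or comment line
def pvB_isHeader (ln : String) : Bool :=
  PySem.Str.strip ln == "" || PySem.Str.startswith (PySem.Str.strip ln) "#"

-- the while loop of B: length of the maximal header prefix
def pvB_boundary : List String → Nat
  | [] => 0
  | ln :: rest => if pvB_isHeader ln then pvB_boundary rest + 1 else 0

-- ln.strip().lstrip("#").strip()  (lstrip("#") as dropWhile, exact)
def pvB_extract (ln : String) : String :=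
  PySem.Str.strip (String.mk ((PySem.Str.strip ln).toList.dropWhile (· == '#')))

-- pass 2: first truthy extracted value, else ""
def pvB_first : List String → String
  | [] => ""
  | ln :: rest => let s := pvB_extract ln; if s ≠ "" then s else pvB_first rest

def extract_bash_synopsis_alt (text : String) : String :=
  let lines := PySem.Str.splitlines text
  let body :=
    match lines with
    | [] => lines
    | l0 :: _ => if PySem.Str.startswith l0 "#!" then lines.drop 1 else lines
  pvB_first (body.take (pvB_boundary body))

-- ===== PRECONDITION & SPEC =====
def Spec_extract_bash_synopsis (text : String) (out : String) : Prop := out = extract_bash_synopsis_alt text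
instance (text : String) (out : String) : Decidable (Spec_extract_bash_synopsis text out) := by unfold Spec_extract_bash_synopsis; infer_instance

-- ===== CLAIM (what is proved, stated in full; the proofs are below) =====
def Claim_equal_extract_bash_synopsis : Prop := ∀ (text : String), Dom_extract_bash_synopsis text → Spec_extract_bash_synopsis text (extract_bash_synopsis text)

-- ===== LEMMAS AND PROOFS =====
theorem pvAB_loop_eq (body : List String) :
    pvA_loop body = pvB_first (body.take (pvB_boundary body)) := by
  induction body with
  | nil => rfl
  | cons ln rest ih =>
    have hA : pvA_loop (ln :: rest) =
        (if PySem.Str.startswith (PySem.Str.strip ln) "#" then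
           (if PySem.Str.strip (pvLstripHash (PySem.Str.strip ln)) ≠ "" then
              PySem.Str.strip (pvLstripHash (PySem.Str.strip ln)) else pvA_loop rest)
         else if PySem.Str.strip ln ≠ "" then "" else pvA_loop rest) := rfl
    have hB1 : ∀ (l0 : String) (l : List String), pvB_first (l0 :: l) =
        (if pvB_extract l0 ≠ "" then pvB_extract l0 else pvB_first l) := fun _ _ => rfl
    have hEx : pvB_extract ln = PySem.Str.strip (pvLstripHash (PySem.Str.strip ln)) := rfl
    by_cases hsh : PySem.Str.startswith (PySem.Str.strip ln) "#" = true
    · have hbd : pvB_boundary (ln :: rest) = pvB_boundary rest + 1 := by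
        show (if pvB_isHeader ln then pvB_boundary rest + 1 else 0) = _
        rw [if_pos (by unfold pvB_isHeader; rw [hsh]; simp)]
      rw [hA, if_pos hsh, hbd, List.take_succ_cons, hB1, hEx, ih]
    · have hshf : PySem.Str.startswith (PySem.Str.strip ln) "#" = false := by
        cases hx : PySem.Str.startswith (PySem.Str.strip ln) "#"
        · rfl
        · exact absurd hx hsh
      by_cases hemp : PySem.Str.strip ln = ""
      · have hbd : pvB_boundary (ln :: rest) = pvB_boundary rest + 1 := by
          show (if pvB_isHeader ln then pvB_boundary rest + 1 else 0) = _
          rw [if_pos (by unfold pvB_isHeader; rw [hemp]; simp)]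
        have hex0 : pvB_extract ln = "" := by rw [hEx, hemp]; rfl
        rw [hA, if_neg hsh, if_neg (not_not_intro hemp), hbd, List.take_succ_cons, hB1,
          hex0, if_neg (by simp), ih]
      · have hbd0 : pvB_boundary (ln :: rest) = 0 := by
          show (if pvB_isHeader ln then pvB_boundary rest + 1 else 0) = _
          rw [if_neg]
          unfold pvB_isHeader
          rw [hshf]
          simp [hemp]
        rw [hA, if_neg hsh, if_pos hemp, hbd0, List.take_zero]
        rfl

-- ===== VERDICT (by name: the statement is the Claim_ definition above) =====
theorem extract_bash_synopsis_spec : Claim_equal_extract_bash_synopsis := by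
  intro text _
  show extract_bash_synopsis text = extract_bash_synopsis_alt text
  unfold extract_bash_synopsis extract_bash_synopsis_alt
  cases h : PySem.Str.splitlines text with
  | nil => rfl
  | cons l0 ls =>
    by_cases hsb : PySem.Str.startswith l0 "#!" = true <;>
      simp only [hsb, if_true, if_false, Bool.false_eq_true, List.drop_zero, List.drop_one] <;>
      rw [pvAB_loop_eq]
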